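-- pv_equiv track=rewrite | github.com/rguo12/CIKM18-LCVA | utils.py | nodeidx2map
-- ===== SOURCE A (Python) =====
-- from collections import defaultdict
--
-- def nodeidx2map(nodeidx):
--     nodemap = defaultdict(list)
--     unique_pos = {}
--     for pos, idx in enumerate(nodeidx):
--         if idx not in unique_pos:
--             # make sure the min pos is stored in unique_pos for each node
--             unique_pos[idx] = pos
--         nodemap[idx].append(pos)
--     return nodemap, unique_pos
-- ===== SOURCE B (Python) =====
-- from collections import defaultdict
--
-- def nodeidx2map(nodeidx):
--     # distinct node indices in first-appearance order
--     keys = list(dict.fromkeys(nodeidx))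
--     # per-key scan: one full pass over the list for each distinct index
--     nodemap = defaultdict(list)
--     for k in keys:
--         nodemap[k] = [p for p, v in enumerate(nodeidx) if v == k]
--     # every key occurs, so its position list is nonempty; its head is the first occurrence
--     unique_pos = {k: nodemap[k][0] for k in keys}
--     return nodemap, unique_pos
-- ===== Notes on version B (the rewrite author's own statement) =====
-- stated objective: alternative
-- what changed: B replaces A's single pass that maintains both dicts with a different traversal: it first dedups the values to get the distinct keys, then runs one full positions scan per key to build each group, and derives unique_pos as the head of each group; this trades A's O(n) single pass for an O(n*k) per-key scan of similar practical cost on few keys.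
import Mathlib
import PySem

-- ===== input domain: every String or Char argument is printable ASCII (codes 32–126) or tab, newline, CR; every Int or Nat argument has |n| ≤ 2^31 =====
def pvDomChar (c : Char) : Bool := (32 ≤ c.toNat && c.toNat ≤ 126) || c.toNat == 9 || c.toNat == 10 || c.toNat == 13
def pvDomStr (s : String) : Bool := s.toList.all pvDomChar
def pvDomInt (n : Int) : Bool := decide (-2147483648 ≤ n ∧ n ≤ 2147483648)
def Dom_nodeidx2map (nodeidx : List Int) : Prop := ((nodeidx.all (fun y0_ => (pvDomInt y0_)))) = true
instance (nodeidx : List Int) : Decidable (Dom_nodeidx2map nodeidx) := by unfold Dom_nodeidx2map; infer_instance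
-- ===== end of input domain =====

-- B dedups the keys first and then scans the whole list once per key, instead of A's single pass that maintains both dicts (alternative traversal, not claimed faster).

-- ===== PORT A =====
-- single pass maintaining both dicts, exactly A's loop body (membership test / conditional insert, then defaultdict append)
def nodeidx2map (nodeidx : List Int) : (List (Int × List Int)) × (List (Int × Int)) :=
  let st := (PySem.List.enumerate nodeidx 0).foldl
    (fun (st : PySem.Dict Int (List Int) × PySem.Dict Int Int) p =>
      (st.1.modify p.2 [] (· ++ [p.1]),
       if st.2.contains p.2 then st.2 else st.2.insert p.2 p.1))
    (PySem.Dict.empty, PySem.Dict.empty)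
  (st.1.items, st.2.items)

-- ===== PORT B =====
-- B-side helpers: the comprehension [p for p, v in enumerate(nodeidx) if v == k]
def pvGroupB (nodeidx : List Int) (k : Int) : List Int :=
  ((PySem.List.enumerate nodeidx 0).filter (fun p => p.2 == k)).map (·.1)

-- the loop 'for k in keys: nodemap[k] = [p for p, v in enumerate(nodeidx) if v == k]'
def pvNodemapB (nodeidx : List Int) : PySem.Dict Int (List Int) :=
  (PySem.List.dedup nodeidx).foldl
    (fun (d : PySem.Dict Int (List Int)) k => d.insert k (pvGroupB nodeidx k))
    PySem.Dict.empty

-- the comprehension {k: nodemap[k][0] for k in keys}; nodemap[k][0] ported as headD 0: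
-- each k occurs in nodeidx, so its position list is nonempty (exact)
def pvUniqueB (nodeidx : List Int) : PySem.Dict Int Int :=
  (PySem.List.dedup nodeidx).foldl
    (fun (d : PySem.Dict Int Int) k => d.insert k (((pvNodemapB nodeidx).getD k []).headD 0))
    PySem.Dict.empty

-- keys = list(dict.fromkeys(nodeidx)) (= PySem.List.dedup); then the two staged passes above
def nodeidx2map_alt (nodeidx : List Int) : (List (Int × List Int)) × (List (Int × Int)) :=
  ((pvNodemapB nodeidx).items, (pvUniqueB nodeidx).items)

-- ===== PRECONDITION & SPEC =====
def Spec_nodeidx2map (nodeidx : List Int) (out : (List (Int × List Int)) × (List (Int × Int))) : Prop := out = nodeidx2map_alt nodeidx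
instance (nodeidx : List Int) (out : (List (Int × List Int)) × (List (Int × Int))) : Decidable (Spec_nodeidx2map nodeidx out) := by unfold Spec_nodeidx2map; infer_instance

-- ===== CLAIM (what is proved, stated in full; the proofs are below) =====
def Claim_equal_nodeidx2map : Prop := ∀ (nodeidx : List Int), Dom_nodeidx2map nodeidx → Spec_nodeidx2map nodeidx (nodeidx2map nodeidx)

-- ===== LEMMAS AND PROOFS =====

-- A's nodemap fold: getD after the fold is the old value ++ positions whose pair carries this key
lemma pv_nm_getD (l : List (Int × Int)) :
    ∀ (d : PySem.Dict Int (List Int)) (k : Int),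
    (l.foldl (fun d p => d.modify p.2 [] (· ++ [p.1])) d).getD k []
      = d.getD k [] ++ (l.filter (fun p => p.2 == k)).map (·.1) := by
  induction l with
  | nil => intro d k; simp
  | cons p t ih =>
    intro d k
    rw [List.foldl_cons, ih, PySem.Dict.getD_modify, List.filter_cons]
    by_cases hk : k = p.2
    · subst hk; simp
    · have hne : (p.2 == k) = false := by simpa using (Ne.symm hk)
      simp [hk, hne]

-- A's nodemap fold: keys in first-appearance order of the pair keys
lemma pv_nm_keys (l : List (Int × Int)) :
    ∀ (d : PySem.Dict Int (List Int)),
    (l.foldl (fun d p => d.modify p.2 [] (· ++ [p.1])) d).keys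
      = PySem.Set.update d.keys (l.map (·.2)) := by
  induction l with
  | nil => intro d; simp [PySem.Set.update]
  | cons p t ih =>
    intro d
    rw [List.foldl_cons, ih, List.map_cons, PySem.Set.update_cons, PySem.Dict.keys_modify]
    congr 1
    cases hc : d.contains p.2 with
    | true =>
      rw [PySem.Dict.keys_insert_of_contains d _ hc]
      exact (PySem.Set.add_of_mem ((PySem.Dict.contains_iff_mem_keys d p.2).mp hc)).symm
    | false =>
      rw [PySem.Dict.keys_insert_of_not_contains d _ hc]
      refine (PySem.Set.add_of_not_mem (fun h => ?_)).symm
      rw [(PySem.Dict.contains_iff_mem_keys d p.2).mpr h] at hc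
      cases hc

-- A's unique_pos fold: getD after the fold is the first position carrying this key
lemma pv_up_getD (l : List (Int × Int)) :
    ∀ (d : PySem.Dict Int Int) (k : Int),
    (l.foldl (fun u p => if u.contains p.2 then u else u.insert p.2 p.1) d).getD k 0
      = if d.contains k then d.getD k 0 else ((l.find? (fun p => p.2 == k)).map (·.1)).getD 0 := by
  induction l with
  | nil =>
    intro d k
    cases hc : d.contains k with
    | true => simp
    | false => simp [PySem.Dict.getD_of_not_contains d 0 hc]
  | cons p t ih =>
    intro d k
    rw [List.foldl_cons]
    by_cases hk : k = p.2
    · subst hk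
      rw [List.find?_cons_of_pos (by simp)]
      cases hc : d.contains p.2 with
      | true =>
        rw [if_pos rfl, ih, hc]
        simp
      | false =>
        rw [if_neg (by simp), ih, if_pos (PySem.Dict.contains_insert_self d p.2 p.1),
          PySem.Dict.getD_insert]
        simp
    · have hne : ¬((p.2 == k) = true) := by simpa using (Ne.symm hk)
      rw [List.find?_cons_of_neg (p := fun q : Int × Int => q.2 == k) hne]
      cases hc : d.contains p.2 with
      | true => rw [if_pos rfl, ih]
      | false =>
        rw [if_neg (by simp), ih, PySem.Dict.contains_insert, PySem.Dict.getD_insert]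
        simp [hk]

-- A's unique_pos fold: keys in first-appearance order of the pair keys
lemma pv_up_keys (l : List (Int × Int)) :
    ∀ (d : PySem.Dict Int Int),
    (l.foldl (fun u p => if u.contains p.2 then u else u.insert p.2 p.1) d).keys
      = PySem.Set.update d.keys (l.map (·.2)) := by
  induction l with
  | nil => intro d; simp [PySem.Set.update]
  | cons p t ih =>
    intro d
    rw [List.foldl_cons, List.map_cons, PySem.Set.update_cons]
    cases hc : d.contains p.2 with
    | true =>
      rw [if_pos rfl, ih]
      congr 1
      exact (PySem.Set.add_of_mem ((PySem.Dict.contains_iff_mem_keys d p.2).mp hc)).symm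
    | false =>
      rw [if_neg (by simp), ih, PySem.Dict.keys_insert_of_not_contains d _ hc]
      congr 1
      refine (PySem.Set.add_of_not_mem (fun h => ?_)).symm
      rw [(PySem.Dict.contains_iff_mem_keys d p.2).mpr h] at hc
      cases hc

-- B's nodemap items: a fresh-distinct-key insert loop appends its items in order
lemma pv_nmB_items (nodeidx : List Int) :
    (pvNodemapB nodeidx).items
      = (PySem.List.dedup nodeidx).map (fun k => (k, pvGroupB nodeidx k)) := by
  have h := PySem.Dict.items_foldl_insert_fresh (PySem.List.dedup nodeidx)
    (fun x : Int => x) (fun k => pvGroupB nodeidx k) PySem.Dict.empty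
    (fun a _ => PySem.Dict.contains_empty a)
    (by rw [PySem.List.dedup_eq_ofList]; simp [PySem.Set.nodup_ofList])
  simpa [pvNodemapB] using h

lemma pv_nmB_getD (nodeidx : List Int) (k : Int) (hk : k ∈ PySem.List.dedup nodeidx) :
    (pvNodemapB nodeidx).getD k [] = pvGroupB nodeidx k := by
  refine PySem.Dict.getD_of_mem_items _ ?_ ?_ []
  · rw [pv_nmB_items]; exact List.mem_map.mpr ⟨k, hk, rfl⟩
  · exact PySem.Dict.nodup_keys_foldl_insert _ (fun _ k => pvGroupB nodeidx k) _
      PySem.Dict.nodup_keys_empty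

-- B's unique_pos items
lemma pv_upB_items (nodeidx : List Int) :
    (pvUniqueB nodeidx).items
      = (PySem.List.dedup nodeidx).map
          (fun k => (k, ((pvNodemapB nodeidx).getD k []).headD 0)) := by
  have h := PySem.Dict.items_foldl_insert_fresh (PySem.List.dedup nodeidx)
    (fun x : Int => x) (fun k => ((pvNodemapB nodeidx).getD k []).headD 0) PySem.Dict.empty
    (fun a _ => PySem.Dict.contains_empty a)
    (by rw [PySem.List.dedup_eq_ofList]; simp [PySem.Set.nodup_ofList])
  simpa [pvUniqueB] using h

-- ===== VERDICT (by name: the statement is the Claim_ definition above) =====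
theorem nodeidx2map_spec : Claim_equal_nodeidx2map := by
  intro nodeidx _
  unfold Spec_nodeidx2map
  simp only [nodeidx2map, nodeidx2map_alt]
  rw [PySem.List.foldl_prod_mk
    (f := fun (d : PySem.Dict Int (List Int)) (p : Int × Int) => d.modify p.2 [] (· ++ [p.1]))
    (g := fun (u : PySem.Dict Int Int) (p : Int × Int) =>
      if u.contains p.2 then u else u.insert p.2 p.1)]
  dsimp only
  have hnodupK : (PySem.List.dedup nodeidx).Nodup := by
    rw [PySem.List.dedup_eq_ofList]; exact PySem.Set.nodup_ofList nodeidx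
  have hkeysEq : PySem.Set.update ([] : List Int)
      ((PySem.List.enumerate nodeidx 0).map (·.2)) = PySem.List.dedup nodeidx := by
    rw [PySem.Set.update_nil_left, PySem.List.map_snd_enumerate, PySem.List.dedup_eq_ofList]
  rw [Prod.mk.injEq]
  refine ⟨?_, ?_⟩
  · -- nodemap component
    have hAk : ((PySem.List.enumerate nodeidx 0).foldl
        (fun d p => d.modify p.2 [] (· ++ [p.1])) PySem.Dict.empty).keys
        = PySem.List.dedup nodeidx := by
      rw [pv_nm_keys, PySem.Dict.keys_empty, hkeysEq]
    rw [PySem.Dict.items_eq_map_keys _ (by rw [hAk]; exact hnodupK) [], hAk, pv_nmB_items]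
    refine List.map_congr_left (fun k _ => ?_)
    rw [pv_nm_getD, PySem.Dict.getD_empty, List.nil_append]
    rfl
  · -- unique_pos component
    have hAk : ((PySem.List.enumerate nodeidx 0).foldl
        (fun u p => if u.contains p.2 then u else u.insert p.2 p.1) PySem.Dict.empty).keys
        = PySem.List.dedup nodeidx := by
      rw [pv_up_keys, PySem.Dict.keys_empty, hkeysEq]
    rw [PySem.Dict.items_eq_map_keys _ (by rw [hAk]; exact hnodupK) 0, hAk, pv_upB_items]
    refine List.map_congr_left (fun k hk => ?_)
    rw [pv_up_getD, PySem.Dict.contains_empty, pv_nmB_getD nodeidx k hk]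
    simp [pvGroupB]
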